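-- pv_equiv track=rewrite | github.com/parasjaing8/ai-chat | models.py | build_ollama_messages
-- ===== SOURCE A (Python) =====
-- AGENT_LABEL: dict[str, str] = {}
--
-- def build_ollama_messages(history: list[dict], agent: str, system: str) -> list[dict]:
--     msgs = [{"role": "system", "content": system}]
--     other_buf: list[str] = []
--
--     def _last_role() -> str:
--         for m in reversed(msgs):
--             if m["role"] in ("user", "assistant"):
--                 return m["role"]
--         return "system"
--
--     def _append_user(text: str):
--         if _last_role() == "user":
--             msgs[-1]["content"] += "\n\n" + text
--         else:
--             msgs.append({"role": "user", "content": text})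
--
--     def flush_others():
--         if other_buf:
--             context = "[Group chat context]\n" + "\n\n".join(other_buf)
--             _append_user(context)
--             other_buf.clear()
--
--     for m in history:
--         if m["role"] == "user":
--             flush_others()
--             _append_user(m["content"])
--         elif m["role"] == agent:
--             flush_others()
--             msgs.append({"role": "assistant", "content": m["content"]})
--         else:
--             label = AGENT_LABEL.get(m["role"], m["role"])
--             other_buf.append(f"[{label}]: {m['content']}")
--
--     flush_others()
--
--     if _last_role() == "assistant":
--         msgs.append({"role": "user", "content": "[Your turn to respond.]"})
--
--     return msgs
-- ===== SOURCE B (Python) =====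
-- AGENT_LABEL: dict[str, str] = {}
--
-- def build_ollama_messages(history: list[dict], agent: str, system: str) -> list[dict]:
--     # Pass 1: flat list of ("user"/"assistant", content) items; buffer other speakers.
--     items: list[tuple[str, str]] = []
--     buf: list[str] = []
--     for m in history:
--         role = m["role"]
--         content = m["content"]
--         if role == "user" or role == agent:
--             if buf:
--                 items.append(("user", "[Group chat context]\n" + "\n\n".join(buf)))
--                 buf = []
--             items.append(("user", content) if role == "user" else ("assistant", content))
--         else:
--             label = AGENT_LABEL.get(role, role)
--             buf.append(f"[{label}]: {content}")
--     if buf: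
--         items.append(("user", "[Group chat context]\n" + "\n\n".join(buf)))
--     if items and items[-1][0] == "assistant":
--         items.append(("user", "[Your turn to respond.]"))
--     # Pass 2: collapse consecutive user items, prepend the system message.
--     msgs = [{"role": "system", "content": system}]
--     for role, content in items:
--         if role == "user" and msgs[-1]["role"] == "user":
--             msgs[-1] = {"role": "user", "content": msgs[-1]["content"] + "\n\n" + content}
--         else:
--             msgs.append({"role": role, "content": content})
--     return msgs
-- ===== Notes on version B (the rewrite author's own statement) =====
-- stated objective: alternative
-- what changed: Replaces A's single pass that mutates the message list in place (with a reversed _last_role scan and nested flush/append closures) by two passes: first build a flat list of typed (role, content) items, then fold it into messages collapsing consecutive user items.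
import Mathlib
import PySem

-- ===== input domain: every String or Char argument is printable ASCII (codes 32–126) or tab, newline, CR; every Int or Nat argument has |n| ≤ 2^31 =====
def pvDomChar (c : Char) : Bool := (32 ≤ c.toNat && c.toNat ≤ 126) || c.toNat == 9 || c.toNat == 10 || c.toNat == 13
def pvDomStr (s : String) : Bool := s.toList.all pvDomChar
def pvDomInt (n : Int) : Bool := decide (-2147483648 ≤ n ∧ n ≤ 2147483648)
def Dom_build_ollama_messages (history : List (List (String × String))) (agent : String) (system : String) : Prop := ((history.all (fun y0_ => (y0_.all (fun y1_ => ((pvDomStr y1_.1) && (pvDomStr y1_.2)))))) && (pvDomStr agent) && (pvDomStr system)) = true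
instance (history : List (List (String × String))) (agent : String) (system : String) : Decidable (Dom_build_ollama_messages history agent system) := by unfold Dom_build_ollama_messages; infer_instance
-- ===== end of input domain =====

-- B rebuilds the message list in two passes (typed items, then a collapsing fold) instead of A's
-- single in-place pass with a reversed last-role scan; same return value, no speed claim.

-- d[k] on an association list (Python dict: first match); "" only on a missing key, which Pre_ excludes
def pvGetD (d : List (String × String)) (k : String) : String :=
  match d with
  | [] => ""
  | (k', v) :: rest => if k' = k then v else pvGetD rest k

-- d[k] = v on an association list (overwrite in place; keys are unique in a Python dict)
def pvSet (d : List (String × String)) (k v : String) : List (String × String) :=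
  match d with
  | [] => [(k, v)]
  | (k', v') :: rest => if k' = k then (k, v) :: rest else (k', v') :: pvSet rest k v

-- AGENT_LABEL = {}
def pvAGENT_LABEL : PySem.Dict String String := PySem.Dict.empty

-- ===== PORT A =====
def pvA_mk (r c : String) : List (String × String) := [("role", r), ("content", c)]

def pvA_lastRoleGo : List (List (String × String)) → String
  | [] => "system"
  | m :: rest =>
      if pvGetD m "role" = "user" ∨ pvGetD m "role" = "assistant" then pvGetD m "role"
      else pvA_lastRoleGo rest

def pvA_lastRole (msgs : List (List (String × String))) : String := pvA_lastRoleGo msgs.reverse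

def pvA_appendUser (msgs : List (List (String × String))) (text : String) : List (List (String × String)) :=
  if pvA_lastRole msgs = "user" then
    match msgs.getLast? with
    | some last => msgs.dropLast ++ [pvSet last "content" (pvGetD last "content" ++ "\n\n" ++ text)]
    | none => msgs
  else msgs ++ [pvA_mk "user" text]

def pvA_flush (msgs : List (List (String × String))) (buf : List String) :
    List (List (String × String)) × List String :=
  if buf ≠ [] then
    (pvA_appendUser msgs ("[Group chat context]\n" ++ PySem.Str.join "\n\n" buf), [])
  else (msgs, buf)

def pvA_step (agent : String) (st : List (List (String × String)) × List String)
    (m : List (String × String)) : List (List (String × String)) × List String :=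
  if pvGetD m "role" = "user" then
    let st2 := pvA_flush st.1 st.2
    (pvA_appendUser st2.1 (pvGetD m "content"), st2.2)
  else if pvGetD m "role" = agent then
    let st2 := pvA_flush st.1 st.2
    (st2.1 ++ [pvA_mk "assistant" (pvGetD m "content")], st2.2)
  else
    (st.1, st.2 ++ ["[" ++ PySem.Dict.getD pvAGENT_LABEL (pvGetD m "role") (pvGetD m "role") ++ "]: " ++ pvGetD m "content"])

def build_ollama_messages (history : List (List (String × String))) (agent : String) (system : String) : List (List (String × String)) :=
  let st := history.foldl (pvA_step agent) ([pvA_mk "system" system], [])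
  let st2 := pvA_flush st.1 st.2
  if pvA_lastRole st2.1 = "assistant" then st2.1 ++ [pvA_mk "user" "[Your turn to respond.]"]
  else st2.1

-- ===== PORT B =====
def pvB_flush (items : List (String × String)) (buf : List String) : List (String × String) :=
  if buf ≠ [] then items ++ [("user", "[Group chat context]\n" ++ PySem.Str.join "\n\n" buf)]
  else items

def pvB_step (agent : String) (st : List (String × String) × List String)
    (m : List (String × String)) : List (String × String) × List String :=
  let r := pvGetD m "role"
  let c := pvGetD m "content"
  if r = "user" ∨ r = agent then
    (pvB_flush st.1 st.2 ++ [if r = "user" then ("user", c) else ("assistant", c)], [])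
  else
    (st.1, st.2 ++ ["[" ++ PySem.Dict.getD pvAGENT_LABEL r r ++ "]: " ++ c])

def pvB_collapseStep (msgs : List (List (String × String))) (it : String × String) :
    List (List (String × String)) :=
  if it.1 = "user" ∧ pvGetD (msgs.getLast?.getD []) "role" = "user" then
    msgs.dropLast ++ [[("role", "user"), ("content", pvGetD (msgs.getLast?.getD []) "content" ++ "\n\n" ++ it.2)]]
  else msgs ++ [[("role", it.1), ("content", it.2)]]

def build_ollama_messages_alt (history : List (List (String × String))) (agent : String) (system : String) : List (List (String × String)) :=
  let st := history.foldl (pvB_step agent) ([], [])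
  let items := pvB_flush st.1 st.2
  let items2 :=
    if items.getLast?.map Prod.fst = some "assistant" then items ++ [("user", "[Your turn to respond.]")]
    else items
  items2.foldl pvB_collapseStep [[("role", "system"), ("content", system)]]

-- ===== PRECONDITION & SPEC =====
-- Pre_ excludes only histories with a message missing a "role" or "content" key, on which A raises KeyError.
def Pre_build_ollama_messages (history : List (List (String × String))) (agent : String) (system : String) : Prop :=
  ∀ m ∈ history, (m.any (fun p => p.1 = "role")) = true ∧ (m.any (fun p => p.1 = "content")) = true
instance (history : List (List (String × String))) (agent : String) (system : String) : Decidable (Pre_build_ollama_messages history agent system) := by unfold Pre_build_ollama_messages; infer_instance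

def pvWitness_build_ollama_messages : (List (List (String × String))) × String × String :=
  ([[("role", "user"), ("content", "hi")], [("role", "bob"), ("content", "yo")]], "bot", "sys")

def Spec_build_ollama_messages (history : List (List (String × String))) (agent : String) (system : String) (out : List (List (String × String))) : Prop := out = build_ollama_messages_alt history agent system
instance (history : List (List (String × String))) (agent : String) (system : String) (out : List (List (String × String))) : Decidable (Spec_build_ollama_messages history agent system out) := by unfold Spec_build_ollama_messages; infer_instance

-- ===== CLAIM (what is proved, stated in full; the proofs are below) =====
def Claim_equal_build_ollama_messages : Prop := ∀ (history : List (List (String × String))) (agent : String) (system : String), Dom_build_ollama_messages history agent system → Pre_build_ollama_messages history agent system → Spec_build_ollama_messages history agent system (build_ollama_messages history agent system)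

-- ===== LEMMAS AND PROOFS =====

-- abstract tail: a list of (role, content) pairs rendered as messages
def pvM (tail : List (String × String)) : List (List (String × String)) :=
  tail.map (fun p => pvA_mk p.1 p.2)

def pvOK (its : List (String × String)) : Prop :=
  ∀ p ∈ its, p.1 = "user" ∨ p.1 = "assistant"

def pvC (s : String) (its : List (String × String)) : List (List (String × String)) :=
  its.foldl pvB_collapseStep [pvA_mk "system" s]

def pvTailStep (tail : List (String × String)) (r c : String) : List (String × String) :=
  match tail.getLast? with
  | some lt =>
      if r = "user" ∧ lt.1 = "user" then tail.dropLast ++ [("user", lt.2 ++ "\n\n" ++ c)]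
      else tail ++ [(r, c)]
  | none => tail ++ [(r, c)]

theorem pvGetD_mk_role (r c : String) : pvGetD (pvA_mk r c) "role" = r := by
  simp [pvA_mk, pvGetD]

theorem pvGetD_mk_content (r c : String) : pvGetD (pvA_mk r c) "content" = c := by
  simp [pvA_mk, pvGetD]

theorem pvSet_mk_content (r c v : String) : pvSet (pvA_mk r c) "content" v = pvA_mk r v := by
  simp [pvA_mk, pvSet]

theorem pvGo_mk_cons (r c : String) (rest : List (List (String × String)))
    (h : r = "user" ∨ r = "assistant") : pvA_lastRoleGo (pvA_mk r c :: rest) = r := by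
  rcases h with h | h <;> subst h <;> simp [pvA_lastRoleGo, pvGetD_mk_role]

theorem pvLR (s : String) (tail : List (String × String)) (hOK : pvOK tail) :
    pvA_lastRole (pvA_mk "system" s :: pvM tail) = (tail.getLast?.map Prod.fst).getD "system" := by
  rcases tail.eq_nil_or_concat with rfl | ⟨t, x, rfl⟩
  · simp [pvA_lastRole, pvM, pvA_lastRoleGo, pvGetD_mk_role]
  · simp only [List.concat_eq_append] at hOK ⊢
    have hx : x.1 = "user" ∨ x.1 = "assistant" := hOK x (by simp)
    simp only [pvA_lastRole, pvM, List.map_append, List.map_cons, List.map_nil,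
      List.reverse_cons, List.reverse_append, List.reverse_cons, List.reverse_nil,
      List.nil_append, List.cons_append, List.getLast?_concat]
    rw [pvGo_mk_cons _ _ _ hx]
    simp

theorem pvSTEP (s : String) (tail : List (String × String)) (x : String × String) :
    pvB_collapseStep (pvA_mk "system" s :: pvM tail) x = pvA_mk "system" s :: pvM (pvTailStep tail x.1 x.2) := by
  rcases tail.eq_nil_or_concat with rfl | ⟨t, y, rfl⟩
  · simp [pvB_collapseStep, pvM, pvTailStep, pvA_mk, pvGetD]
  · simp only [List.concat_eq_append] at *
    have hlast : (pvA_mk "system" s :: pvM (t ++ [y])).getLast? = some (pvA_mk y.1 y.2) := by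
      simp only [pvM, List.map_append, List.map_cons, List.map_nil]
      rw [← List.cons_append, List.getLast?_concat]
    have hdrop : (pvA_mk "system" s :: pvM (t ++ [y])).dropLast = pvA_mk "system" s :: pvM t := by
      simp only [pvM, List.map_append, List.map_cons, List.map_nil]
      rw [← List.cons_append, List.dropLast_concat]
    by_cases hc : x.1 = "user" ∧ y.1 = "user"
    · simp only [pvB_collapseStep, hlast, Option.getD_some, pvGetD_mk_role, pvGetD_mk_content,
        hc.1, hc.2, and_self, if_true, hdrop, pvTailStep, List.getLast?_concat,
        List.dropLast_concat]
      simp [pvM, pvA_mk]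
    · rw [pvB_collapseStep, pvTailStep]
      simp only [hlast, Option.getD_some, pvGetD_mk_role, List.getLast?_concat]
      rw [if_neg hc, if_neg hc]
      simp [pvM, pvA_mk]

theorem pvC_concat (s : String) (its : List (String × String)) (x : String × String) :
    pvC s (its ++ [x]) = pvB_collapseStep (pvC s its) x := by
  simp [pvC, List.foldl_append]

theorem pvOK_tailStep (tail : List (String × String)) (r c : String) (hOK : pvOK tail)
    (hr : r = "user" ∨ r = "assistant") : pvOK (pvTailStep tail r c) := by
  unfold pvTailStep
  rcases h : tail.getLast? with _ | lt
  all_goals dsimp only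
  · intro p hp
    rcases List.mem_append.1 hp with h1 | h1
    · exact hOK p h1
    · simp at h1; subst h1; exact hr
  · split_ifs with hc
    · intro p hp
      rcases List.mem_append.1 hp with h1 | h1
      · exact hOK p (List.dropLast_subset _ h1)
      · simp at h1; subst h1; left; rfl
    · intro p hp
      rcases List.mem_append.1 hp with h1 | h1
      · exact hOK p h1
      · simp at h1; subst h1; exact hr

theorem pvTailStep_last (tail : List (String × String)) (r c : String) :
    (pvTailStep tail r c).getLast?.map Prod.fst = some r := by
  unfold pvTailStep
  rcases h : tail.getLast? with _ | lt
  all_goals dsimp only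
  · simp
  · split_ifs with hc
    · simp [hc.1]
    · simp

theorem pvSHAPE (s : String) (its : List (String × String)) (hOK : pvOK its) :
    ∃ tail, pvC s its = pvA_mk "system" s :: pvM tail ∧ pvOK tail ∧
      tail.getLast?.map Prod.fst = its.getLast?.map Prod.fst := by
  induction its using List.reverseRecOn with
  | nil => exact ⟨[], by simp [pvC, pvM], by intro p hp; simp at hp, by simp⟩
  | append_singleton its x ih =>
    have hOK' : pvOK its := fun p hp => hOK p (List.mem_append.2 (Or.inl hp))
    have hx : x.1 = "user" ∨ x.1 = "assistant" := hOK x (by simp)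
    obtain ⟨tail, hC, hOKt, _⟩ := ih hOK'
    refine ⟨pvTailStep tail x.1 x.2, ?_, pvOK_tailStep tail x.1 x.2 hOKt hx, ?_⟩
    · rw [pvC_concat, hC, pvSTEP]
    · rw [pvTailStep_last]; simp

theorem pvC_concat_assistant (s c : String) (its : List (String × String)) :
    pvC s (its ++ [("assistant", c)]) = pvC s its ++ [pvA_mk "assistant" c] := by
  rw [pvC_concat, pvB_collapseStep]
  have hno : ¬((("assistant", c) : String × String).1 = "user" ∧
      pvGetD ((pvC s its).getLast?.getD []) "role" = "user") := by
    rintro ⟨h, -⟩; simp at h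
  rw [if_neg hno]
  simp [pvA_mk]

theorem pvAPPA (s : String) (its : List (String × String)) (t : String) (hOK : pvOK its) :
    pvA_appendUser (pvC s its) t = pvC s (its ++ [("user", t)]) := by
  obtain ⟨tail, hC, hOKt, _⟩ := pvSHAPE s its hOK
  rw [pvC_concat, hC, pvSTEP]
  rw [pvA_appendUser, pvLR s tail hOKt]
  rcases tail.eq_nil_or_concat with rfl | ⟨t', y, rfl⟩
  · simp [pvM, pvTailStep, pvA_mk]
  · simp only [List.concat_eq_append] at *
    have hlast : (pvA_mk "system" s :: pvM (t' ++ [y])).getLast? = some (pvA_mk y.1 y.2) := by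
      simp only [pvM, List.map_append, List.map_cons, List.map_nil]
      rw [← List.cons_append, List.getLast?_concat]
    have hdrop : (pvA_mk "system" s :: pvM (t' ++ [y])).dropLast = pvA_mk "system" s :: pvM t' := by
      simp only [pvM, List.map_append, List.map_cons, List.map_nil]
      rw [← List.cons_append, List.dropLast_concat]
    by_cases hy : y.1 = "user"
    · have hcond : (((t' ++ [y]).getLast?.map Prod.fst).getD "system") = "user" := by
        rw [List.getLast?_concat]; simp [hy]
      rw [if_pos hcond, hlast]
      dsimp only
      rw [hdrop, pvTailStep]
      simp only [List.getLast?_concat]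
      rw [if_pos (⟨trivial, hy⟩ : True ∧ y.1 = "user"), List.dropLast_concat]
      simp [pvM, pvSet_mk_content, pvGetD_mk_content, hy]
    · have hcond : ¬(((t' ++ [y]).getLast?.map Prod.fst).getD "system") = "user" := by
        rw [List.getLast?_concat]; simp [hy]
      rw [if_neg hcond, pvTailStep]
      simp only [List.getLast?_concat]
      have hno : ¬(True ∧ y.1 = "user") := by simp [hy]
      rw [if_neg hno]
      simp [pvM, pvA_mk]

theorem pvFLUSH (s : String) (its : List (String × String)) (buf : List String) (hOK : pvOK its) :
    pvA_flush (pvC s its) buf = (pvC s (pvB_flush its buf), []) ∧ pvOK (pvB_flush its buf) := by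
  by_cases hb : buf = []
  · subst hb; simp [pvA_flush, pvB_flush, hOK]
  · constructor
    · rw [pvA_flush, pvB_flush, if_pos hb, if_pos hb,
        pvAPPA s its ("[Group chat context]\n" ++ PySem.Str.join "\n\n" buf) hOK]
    · rw [pvB_flush, if_pos hb]
      intro p hp
      rcases List.mem_append.1 hp with h1 | h1
      · exact hOK p h1
      · simp at h1; left; rw [h1]

theorem pvSTEPEQ (agent s : String) (m : List (String × String))
    (its : List (String × String)) (buf : List String) (hOK : pvOK its) :
    pvA_step agent (pvC s its, buf) m = (pvC s (pvB_step agent (its, buf) m).1, (pvB_step agent (its, buf) m).2) ∧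
    pvOK (pvB_step agent (its, buf) m).1 := by
  obtain ⟨hfl, hOKf⟩ := pvFLUSH s its buf hOK
  by_cases hu : pvGetD m "role" = "user"
  · refine ⟨?_, ?_⟩
    · simp only [pvA_step, pvB_step, hu, true_or, if_true]
      simp only [hfl]
      rw [pvAPPA s _ _ hOKf]
    · simp only [pvB_step, hu, true_or, if_true]
      intro p hp
      rcases List.mem_append.1 hp with h1 | h1
      · exact hOKf p h1
      · simp at h1; left; rw [h1]
  · by_cases ha : pvGetD m "role" = agent
    · refine ⟨?_, ?_⟩
      · simp only [pvA_step, pvB_step, if_neg hu, if_pos ha, if_pos (Or.inr ha)]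
        simp only [hfl]
        rw [pvC_concat_assistant]
      · simp only [pvB_step, if_pos (Or.inr ha), if_neg hu]
        intro p hp
        rcases List.mem_append.1 hp with h1 | h1
        · exact hOKf p h1
        · simp at h1; right; rw [h1]
    · have hno : ¬(pvGetD m "role" = "user" ∨ pvGetD m "role" = agent) := by
        rintro (h | h)
        · exact hu h
        · exact ha h
      refine ⟨?_, ?_⟩
      · simp only [pvA_step, pvB_step, if_neg hu, if_neg ha, if_neg hno]
      · simp only [pvB_step, if_neg hno]
        exact hOK

theorem pvMAIN (agent s : String) (hist : List (List (String × String)))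
    (its : List (String × String)) (buf : List String) (hOK : pvOK its) :
    List.foldl (pvA_step agent) (pvC s its, buf) hist =
      ((pvC s (List.foldl (pvB_step agent) (its, buf) hist).1),
        (List.foldl (pvB_step agent) (its, buf) hist).2) ∧
    pvOK (List.foldl (pvB_step agent) (its, buf) hist).1 := by
  induction hist generalizing its buf with
  | nil => exact ⟨rfl, hOK⟩
  | cons m rest ih =>
    obtain ⟨h1, h2⟩ := pvSTEPEQ agent s m its buf hOK
    have := ih (pvB_step agent (its, buf) m).1 (pvB_step agent (its, buf) m).2 h2
    simp only [List.foldl_cons, h1]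
    exact this

-- ===== VERDICT (by name: the statement is the Claim_ definition above) =====
theorem build_ollama_messages_spec : Claim_equal_build_ollama_messages := by
  intro history agent system _ _
  unfold Spec_build_ollama_messages build_ollama_messages build_ollama_messages_alt
  have h0 : pvOK [] := by intro p hp; simp at hp
  obtain ⟨hfold, hOKb⟩ := pvMAIN agent system history [] [] h0
  have hCnil : pvC system [] = [pvA_mk "system" system] := rfl
  rw [← hCnil, hfold]
  set stB := List.foldl (pvB_step agent) ([], []) history with hstB
  obtain ⟨hfl, hOKf⟩ := pvFLUSH system stB.1 stB.2 hOKb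
  simp only [hfl]
  set its' := pvB_flush stB.1 stB.2 with hits'
  have hfold2 : ∀ l : List (String × String),
      List.foldl pvB_collapseStep [[("role", "system"), ("content", system)]] l = pvC system l :=
    fun _ => rfl
  rw [hfold2]
  obtain ⟨tail, hC, hOKt, hlastEq⟩ := pvSHAPE system its' hOKf
  by_cases hA : its'.getLast?.map Prod.fst = some "assistant"
  · rw [if_pos hA]
    have hcond : pvA_lastRole (pvC system its') = "assistant" := by
      rw [hC, pvLR system tail hOKt, hlastEq, hA]; rfl
    rw [if_pos hcond, pvC_concat, pvB_collapseStep]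
    have hrole : pvGetD ((pvC system its').getLast?.getD []) "role" = "assistant" := by
      rcases tail.eq_nil_or_concat with rfl | ⟨t', y, rfl⟩
      · rw [← hlastEq] at hA; simp at hA
      · simp only [List.concat_eq_append] at *
        have hy : y.1 = "assistant" := by
          rw [← hlastEq, List.getLast?_concat] at hA
          simpa using hA
        have hlast : (pvA_mk "system" system :: pvM (t' ++ [y])).getLast? = some (pvA_mk y.1 y.2) := by
          simp only [pvM, List.map_append, List.map_cons, List.map_nil]
          rw [← List.cons_append, List.getLast?_concat]
        rw [hC, hlast]
        simp [pvGetD_mk_role, hy]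
    have hno : ¬((("user", "[Your turn to respond.]") : String × String).1 = "user" ∧
        pvGetD ((pvC system its').getLast?.getD []) "role" = "user") := by
      rintro ⟨-, h⟩
      rw [hrole] at h
      simp at h
    rw [if_neg hno]
    rfl
  · have hcond : ¬ pvA_lastRole (pvC system its') = "assistant" := by
      rw [hC, pvLR system tail hOKt, hlastEq]
      rcases h : its'.getLast? with _ | z
      · simp
      · simp only [Option.map_some, Option.getD_some]
        intro hz
        exact hA (by rw [h, Option.map_some, hz])
    rw [if_neg hcond, if_neg hA]
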